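-- pv_equiv track=rewrite | github.com/mmaaz-git/agentic-pbt-site | results/cython/aux_files/0a25953a/proposed_fix.py | chars_to_ranges_fixed
-- ===== SOURCE A (Python) =====
-- def chars_to_ranges_fixed(s):
--     """
--     FIXED VERSION - Correctly handles duplicates
--     """
--     char_list = list(s)
--     char_list.sort()
--     i = 0
--     n = len(char_list)
--     result = []
--     while i < n:
--         code1 = ord(char_list[i])
--         code2 = code1 + 1
--         i += 1
--         while i < n and code2 >= ord(char_list[i]):
--             # Only increment code2 if we see a NEW character in sequence
--             if ord(char_list[i]) >= code2:
--                 code2 = ord(char_list[i]) + 1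
--             i += 1
--         result.append(code1)
--         result.append(code2)
--     return result
-- ===== SOURCE B (Python) =====
-- def chars_to_ranges_fixed(s):
--     present = {ord(c) for c in s}
--     if not present:
--         return []
--     lo, hi = min(present), max(present)
--     result = []
--     in_run = False
--     for code in range(lo, hi + 2):
--         if code in present:
--             if not in_run:
--                 result.append(code)
--                 in_run = True
--         else:
--             if in_run:
--                 result.append(code)
--                 in_run = False
--     return result
-- ===== Notes on version B (the rewrite author's own statement) =====
-- stated objective: faster
-- what changed: Replaces A's sort of all characters plus an index-walking double while-loop merge with a sort-free algorithm: build a presence set of code points once, then sweep the integer interval [min, max+1] a single time, emitting a code exactly where set membership toggles an in-run flag.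
import Mathlib
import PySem

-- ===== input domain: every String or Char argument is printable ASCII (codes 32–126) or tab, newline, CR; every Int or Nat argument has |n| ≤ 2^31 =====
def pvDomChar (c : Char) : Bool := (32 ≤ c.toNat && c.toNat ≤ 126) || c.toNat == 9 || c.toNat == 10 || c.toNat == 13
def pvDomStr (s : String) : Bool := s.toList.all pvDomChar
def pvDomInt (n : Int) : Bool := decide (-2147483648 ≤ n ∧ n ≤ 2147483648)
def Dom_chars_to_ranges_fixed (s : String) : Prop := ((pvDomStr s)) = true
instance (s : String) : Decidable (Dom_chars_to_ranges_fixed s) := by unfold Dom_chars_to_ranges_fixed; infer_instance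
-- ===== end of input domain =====

-- B drops A's sort + index-walking double while-loop merge: it builds a presence set of code
-- points and sweeps the integer interval [min, max+1] once, emitting a code exactly where set
-- membership toggles an in-run flag (objective: alternative algorithm, no sort).

-- ===== PORT A =====
-- inner 'while i < n and code2 >= ord(char_list[i])' loop: consumes a prefix, returns (code2, remaining suffix)
def pvAInner (code2 : Int) (l : List Char) : Int × List Char :=
  match l with
  | [] => (code2, [])
  | c :: rest =>
    if code2 ≥ (c.toNat : Int) then
      pvAInner (if (c.toNat : Int) ≥ code2 then (c.toNat : Int) + 1 else code2) rest
    else (code2, c :: rest)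

theorem pvAInner_length_le (code2 : Int) (l : List Char) :
    (pvAInner code2 l).2.length ≤ l.length := by
  induction l generalizing code2 with
  | nil => simp [pvAInner]
  | cons c rest ih =>
    simp only [pvAInner]
    split
    · exact le_trans (ih _) (Nat.le_succ _)
    · simp

-- outer 'while i < n' loop over the sorted char list
def pvAOuter (l : List Char) : List Int :=
  match l with
  | [] => []
  | c :: rest =>
    let p := pvAInner ((c.toNat : Int) + 1) rest
    (c.toNat : Int) :: p.1 :: pvAOuter p.2
termination_by l.length
decreasing_by
  exact Nat.lt_succ_of_le (pvAInner_length_le _ _)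

-- char_list.sort() sorts by code point (Python's string ordering), then the outer loop runs
def chars_to_ranges_fixed (s : String) : List Int :=
  pvAOuter (PySem.List.sorted s.toList (fun c => (c.toNat : Int)) false)

-- ===== PORT B =====
-- one step of Source B's sweep loop: state = (result, in_run); 'code in present' / append / toggle
def pvBStep (present : List Int) (st : List Int × Bool) (code : Int) : List Int × Bool :=
  if present.contains code then
    if !st.2 then (st.1 ++ [code], true) else st
  else
    if st.2 then (st.1 ++ [code], false) else st

def chars_to_ranges_fixed_alt (s : String) : List Int :=
  let present := PySem.Set.ofList (s.toList.map (fun c => (c.toNat : Int)))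
  -- 'if not present: return []' and 'lo, hi = min(present), max(present)'
  match PySem.List.min? present (fun x => x), PySem.List.max? present (fun x => x) with
  | some lo, some hi =>
      ((PySem.List.pyRange lo (hi + 2) 1).foldl (pvBStep present) ([], false)).1
  | _, _ => []

-- ===== PRECONDITION & SPEC =====
def Spec_chars_to_ranges_fixed (s : String) (out : List Int) : Prop := out = chars_to_ranges_fixed_alt s
instance (s : String) (out : List Int) : Decidable (Spec_chars_to_ranges_fixed s out) := by unfold Spec_chars_to_ranges_fixed; infer_instance

-- ===== CLAIM (what is proved, stated in full; the proofs are below) =====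
def Claim_equal_chars_to_ranges_fixed : Prop := ∀ (s : String), Dom_chars_to_ranges_fixed s → Spec_chars_to_ranges_fixed s (chars_to_ranges_fixed s)

-- ===== LEMMAS AND PROOFS =====

-- canonical run grouping of a strictly increasing code list (proof helper shared by both sides)
def pvRuns (start prev : Int) (l : List Int) : List Int :=
  match l with
  | [] => [start, prev + 1]
  | c :: rest => if c = prev + 1 then pvRuns start c rest
                 else start :: (prev + 1) :: pvRuns c c rest

-- the tail of pvRuns: the emitted codes from prev+1 onwards
def pvTailRuns (prev : Int) (l : List Int) : List Int :=
  match l with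
  | [] => [prev + 1]
  | c :: rest => if c = prev + 1 then pvTailRuns c rest
                 else (prev + 1) :: c :: pvTailRuns c rest

theorem pvRuns_eq_cons (start prev : Int) (l : List Int) :
    pvRuns start prev l = start :: pvTailRuns prev l := by
  induction l generalizing start prev with
  | nil => simp [pvRuns, pvTailRuns]
  | cons c rest ih =>
    simp only [pvRuns, pvTailRuns]
    split
    · exact ih start c
    · rw [ih c c]

-- adjacent dedup relative to a previous value
def pvDedupP (prev : Int) (l : List Int) : List Int :=
  match l with
  | [] => []
  | a :: r => if a = prev then pvDedupP prev r else a :: pvDedupP a r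

theorem mem_cons_pvDedupP (prev : Int) (l : List Int) (a : Int) :
    a ∈ prev :: pvDedupP prev l ↔ a ∈ prev :: l := by
  induction l generalizing prev with
  | nil => simp [pvDedupP]
  | cons b r ih =>
    simp only [pvDedupP]
    split
    · subst_vars
      rw [ih]
      simp
    · constructor
      · intro h
        rcases List.mem_cons.mp h with h | h
        · simp [h]
        · have := (ih b).mp h
          simp at this ⊢
          tauto
      · intro h
        simp at h
        rcases h with h | h | h
        · simp [h]
        · exact List.mem_cons_of_mem _ ((ih b).mpr (by simp [h]))
        · exact List.mem_cons_of_mem _ ((ih b).mpr (by simp [h]))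

theorem pairwise_pvDedupP (prev : Int) (l : List Int)
    (h : (prev :: l).Pairwise (· ≤ ·)) :
    (prev :: pvDedupP prev l).Pairwise (· < ·) := by
  induction l generalizing prev with
  | nil => simp [pvDedupP]
  | cons b r ih =>
    rw [List.pairwise_cons] at h
    obtain ⟨hprev, hbr⟩ := h
    simp only [pvDedupP]
    split
    · subst_vars
      exact ih prev hbr
    · have hlt : prev < b := lt_of_le_of_ne (hprev b (by simp)) (by omega)
      have hb := ih b hbr
      rw [List.pairwise_cons]
      refine ⟨fun y hy => ?_, hb⟩
      rcases List.mem_cons.mp hy with h | h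
      · omega
      · exact lt_trans hlt ((List.pairwise_cons.mp hb).1 y h)

-- A's inner+outer loops on a sorted char list compute the run grouping of the deduped codes
theorem pvAInner_eq_runs (l : List Char) (start prev : Int)
    (h : (prev :: l.map (fun c => (c.toNat : Int))).Pairwise (· ≤ ·)) :
    start :: (pvAInner (prev + 1) l).1 :: pvAOuter (pvAInner (prev + 1) l).2
      = pvRuns start prev (pvDedupP prev (l.map (fun c => (c.toNat : Int)))) := by
  induction l generalizing start prev with
  | nil => simp [pvAInner, pvAOuter, pvDedupP, pvRuns]
  | cons ch rest ih =>
    rw [List.pairwise_cons] at h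
    obtain ⟨hprev, hrest⟩ := h
    simp only [List.map_cons] at hprev hrest
    set x : Int := (ch.toNat : Int) with hxdef
    have hx : prev ≤ x := hprev _ (by simp)
    have hrest' : (x :: rest.map (fun c => (c.toNat : Int))).Pairwise (· ≤ ·) := hrest
    by_cases hxe : x = prev
    · -- duplicate: A skips it, the dedup drops it
      simp only [pvAInner, List.map_cons, pvDedupP, ← hxdef]
      rw [if_pos (by omega), if_neg (by omega), if_pos hxe]
      have hp : (prev :: rest.map (fun c => (c.toNat : Int))).Pairwise (· ≤ ·) := by
        rw [List.pairwise_cons]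
        rcases List.pairwise_cons.mp hrest' with ⟨hb, hr⟩
        exact ⟨fun y hy => by have := hb y hy; omega, hr⟩
      exact ih start prev hp
    · by_cases hxc : x = prev + 1
      · -- consecutive: A extends code2, the run continues
        simp only [pvAInner, List.map_cons, pvDedupP, ← hxdef]
        rw [if_pos (by omega), if_pos (by omega), if_neg hxe, pvRuns, if_pos hxc]
        exact ih start x hrest'
      · -- gap: A closes the run and restarts
        simp only [pvAInner, List.map_cons, pvDedupP, ← hxdef]
        rw [if_neg (by omega), if_neg hxe, pvRuns, if_neg (by omega)]
        have houter := ih x x hrest'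
        simp only [pvAOuter, ← hxdef]
        rw [houter]

-- strictly increasing lists: the default-last bounds every element from above
theorem pvLastD_isMax (l : List Int) : ∀ (prev : Int),
    (prev :: l).Pairwise (· < ·) → ∀ y ∈ prev :: l, y ≤ l.getLastD prev := by
  induction l with
  | nil => intro prev _ y hy; simp at hy; simp [hy]
  | cons c r ih =>
    intro prev h y hy
    rw [List.pairwise_cons] at h
    have hpc : prev < c := h.1 c (by simp)
    have hmax := ih c h.2
    rw [List.getLastD_cons]
    rcases List.mem_cons.mp hy with h' | h'
    · have := hmax c (by simp)
      omega
    · exact hmax y h'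

-- B's sweep as a filter: a pass over consecutive codes starting with in_run = membership of a-1
-- emits exactly the codes where membership changes, and ends with in_run = membership of the last code
theorem pvFoldl_filter (present : List Int) (n : Nat) : ∀ (a : Int) (res : List Int),
    (PySem.List.pyRange a (a + n) 1).foldl (pvBStep present) (res, present.contains (a - 1))
      = (res ++ (PySem.List.pyRange a (a + n) 1).filter
            (fun c => present.contains c != present.contains (c - 1)),
         present.contains (a + n - 1)) := by
  induction n with
  | zero =>
    intro a res
    rw [show a + ((0 : Nat) : Int) = a by simp, PySem.List.pyRange_one_eq_nil le_rfl]
    simp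
  | succ m ih =>
    intro a res
    rw [show a + ((m + 1 : Nat) : Int) = (a + 1) + (m : Nat) by push_cast; ring,
        PySem.List.pyRange_one_cons (by omega)]
    simp only [List.foldl_cons, List.filter_cons]
    have hstep : pvBStep present (res, present.contains (a - 1)) a
        = (res ++ (if (present.contains a != present.contains (a - 1)) = true then [a] else []),
           present.contains a) := by
      cases hma : present.contains a <;> cases hmp : present.contains (a - 1) <;>
        simp_all [pvBStep, List.contains_eq_mem]
    rw [hstep]
    have H := ih (a + 1)
      (res ++ (if (present.contains a != present.contains (a - 1)) = true then [a] else []))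
    simp only [add_sub_cancel_right] at H
    rw [H]
    split <;> simp

-- the boundary filter over [prev+1, last+2) is the tail of the run grouping of the sorted codes
theorem pvFilter_eq_tailRuns (present : List Int) (l : List Int) : ∀ (prev : Int),
    prev ∈ present →
    (∀ c, prev < c → (c ∈ present ↔ c ∈ l)) →
    (prev :: l).Pairwise (· < ·) →
    (PySem.List.pyRange (prev + 1) (l.getLastD prev + 2) 1).filter
        (fun c => present.contains c != present.contains (c - 1))
      = pvTailRuns prev l := by
  induction l with
  | nil =>
    intro prev hmemp hchar _
    have h0 : present.contains prev = true := List.contains_iff_mem.mpr hmemp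
    have h1 : prev + 1 ∉ present := fun h =>
      List.not_mem_nil ((hchar (prev + 1) (by omega)).mp h)
    rw [List.getLastD_nil, show prev + 2 = (prev + 1) + 1 by ring,
        PySem.List.pyRange_one_singleton]
    simp [show prev + 1 - 1 = prev by ring, List.contains_eq_mem,
          hmemp, h1, pvTailRuns]
  | cons c r ih =>
    intro prev hmemp hchar hsorted
    rw [List.pairwise_cons] at hsorted
    obtain ⟨hlt, hsr⟩ := hsorted
    have hpc : prev < c := hlt c (by simp)
    have hcr : ∀ y ∈ r, c < y := (List.pairwise_cons.mp hsr).1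
    have hmemc : c ∈ present := (hchar c hpc).mpr (by simp)
    have hcharr : ∀ y, c < y → (y ∈ present ↔ y ∈ r) := by
      intro y hy
      rw [hchar y (by omega)]
      constructor
      · intro h
        rcases List.mem_cons.mp h with h | h
        · omega
        · exact h
      · exact fun h => List.mem_cons_of_mem _ h
    have hnotmem : ∀ y, prev < y → y < c → y ∉ present := by
      intro y h1 h2 h
      rcases List.mem_cons.mp ((hchar y h1).mp h) with h' | h'
      · omega
      · have := hcr y h'; omega
    have h0 : present.contains prev = true := List.contains_iff_mem.mpr hmemp
    have hc1 : present.contains c = true := List.contains_iff_mem.mpr hmemc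
    have hclast : c ≤ r.getLastD c := pvLastD_isMax r c hsr c (by simp)
    rw [List.getLastD_cons]
    by_cases hcons : c = prev + 1
    · -- consecutive: prev+1 is in the set and so is prev; no boundary, the run continues
      subst hcons
      rw [PySem.List.pyRange_one_cons (by omega), List.filter_cons]
      have hpred : (present.contains (prev + 1) != present.contains (prev + 1 - 1)) = false := by
        simp only [show prev + 1 - 1 = prev by ring, h0, hc1, bne_self_eq_false]
      rw [hpred]
      simp only [Bool.false_eq_true, if_false]
      rw [ih (prev + 1) hmemc hcharr hsr]
      simp [pvTailRuns]
    · -- gap: prev+1 closes the old run, c opens the next one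
      have hgap : prev + 1 < c := lt_of_le_of_ne (by omega) (by omega)
      rw [PySem.List.pyRange_one_append (prev + 1) (c + 1) (r.getLastD c + 2)
            (by omega) (by omega),
          List.filter_append,
          PySem.List.pyRange_one_cons (show prev + 1 < c + 1 by omega),
          PySem.List.pyRange_one_append (prev + 1 + 1) c (c + 1) (by omega) (by omega),
          PySem.List.pyRange_one_singleton]
      have hbp : prev + 1 ∉ present := hnotmem (prev + 1) (by omega) hgap
      have hbc1 : c - 1 ∉ present := hnotmem (c - 1) (by omega) (by omega)
      have := ih c hmemc hcharr hsr
      rw [this]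
      simp only [List.filter_cons, List.filter_append,
            show prev + 1 - 1 = prev by ring, List.contains_eq_mem, pvTailRuns]
      simp [hbp, hmemp, hmemc, hbc1, hcons, List.filter_eq_nil_iff,
            PySem.List.mem_pyRange_one]
      intro a h1 h2
      exact iff_of_false (hnotmem a (by omega) h2) (hnotmem (a - 1) (by omega) (by omega))

-- ===== VERDICT (by name: the statement is the Claim_ definition above) =====
theorem chars_to_ranges_fixed_spec : Claim_equal_chars_to_ranges_fixed := by
  intro s _
  unfold Spec_chars_to_ranges_fixed chars_to_ranges_fixed chars_to_ranges_fixed_alt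
  rcases hL : PySem.List.sorted s.toList (fun c => (c.toNat : Int)) false with _ | ⟨ch, rest⟩
  · -- empty string: both return []
    have hs : s.toList = [] := (PySem.List.sorted_eq_nil_iff _ _ _).mp hL
    simp [hs, pvAOuter, PySem.Set.ofList, PySem.List.min?]
  · set x : Int := (ch.toNat : Int) with hxdef
    set D : List Int := pvDedupP x (rest.map (fun c => (c.toNat : Int))) with hDdef
    set present : List Int := PySem.Set.ofList (s.toList.map (fun c => (c.toNat : Int)))
      with hPdef
    have hpair : (x :: rest.map (fun c => (c.toNat : Int))).Pairwise (· ≤ ·) := by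
      have h := PySem.List.sorted_map_key_pairwise (xs := s.toList) (key := fun c => (c.toNat : Int))
      rw [hL, List.map_cons] at h
      exact h
    have hMsort : (x :: D).Pairwise (· < ·) := pairwise_pvDedupP x _ hpair
    have hDgt : ∀ y ∈ D, x < y := (List.pairwise_cons.mp hMsort).1
    have hmemM : ∀ a : Int, a ∈ present ↔ a ∈ x :: D := by
      intro a
      rw [hPdef, PySem.Set.mem_ofList, mem_cons_pvDedupP]
      have hperm : ((ch :: rest).map (fun c => (c.toNat : Int))).Perm
          (s.toList.map (fun c => (c.toNat : Int))) := by
        have := PySem.List.sorted_perm (xs := s.toList) (key := fun c => (c.toNat : Int)) (rev := false)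
        rw [hL] at this
        exact this.map _
      rw [← hperm.mem_iff]
      simp [← hxdef]
    have hxmem : x ∈ present := (hmemM x).mpr (by simp)
    -- min(present) = x, the head of the sorted distinct codes
    obtain ⟨lo, hlo⟩ : ∃ lo, PySem.List.min? present (fun y => y) = some lo := by
      cases hmn : PySem.List.min? present (fun y => y) with
      | none =>
        have : present = [] := (PySem.List.min?_eq_none_iff _ _).mp hmn
        rw [this] at hxmem
        exact absurd hxmem (List.not_mem_nil)
      | some lo => exact ⟨lo, rfl⟩
    have hlo_eq : lo = x := by
      have hmem := PySem.List.min?_mem hlo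
      have hmin := PySem.List.min?_isMin hlo x hxmem
      have : x ≤ lo := by
        rcases List.mem_cons.mp ((hmemM lo).mp hmem) with h | h
        · omega
        · exact le_of_lt (hDgt lo h)
      omega
    -- max(present) = the last of the sorted distinct codes
    set lastM : Int := D.getLastD x with hlastdef
    have hlast_mem : lastM ∈ present := (hmemM lastM).mpr List.getLastD_mem_cons
    obtain ⟨hi, hhi⟩ : ∃ hi, PySem.List.max? present (fun y => y) = some hi := by
      cases hmx : PySem.List.max? present (fun y => y) with
      | none =>
        have : present = [] := (PySem.List.max?_eq_none_iff _ _).mp hmx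
        rw [this] at hxmem
        exact absurd hxmem (List.not_mem_nil)
      | some hi => exact ⟨hi, rfl⟩
    have hhi_eq : hi = lastM := by
      have hmem := PySem.List.max?_mem hhi
      have hmax := PySem.List.max?_isMax hhi lastM hlast_mem
      have : hi ≤ lastM := pvLastD_isMax D x hMsort hi ((hmemM hi).mp hmem)
      omega
    have hxlast : x ≤ lastM := pvLastD_isMax D x hMsort x (by simp)
    simp only [hlo, hhi, hlo_eq, hhi_eq]
    -- B's sweep = the boundary filter over [x, lastM+2)
    have hxm1' : x - 1 ∉ present := by
      intro h
      rcases List.mem_cons.mp ((hmemM (x - 1)).mp h) with h' | h'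
      · omega
      · have := hDgt _ h'; omega
    have hxm1 : present.contains (x - 1) = false := by
      rw [List.contains_eq_mem]; simp [hxm1']
    have HF := pvFoldl_filter present ((lastM + 2 - x).toNat) x []
    rw [show x + (((lastM + 2 - x).toNat : Nat) : Int) = lastM + 2 by
          rw [Int.toNat_of_nonneg (by omega)]; ring] at HF
    rw [hxm1] at HF
    rw [HF]
    -- identify the filter with x :: pvTailRuns x D
    have hx1 : present.contains x = true := List.contains_iff_mem.mpr hxmem
    have hfilter : (PySem.List.pyRange x (lastM + 2) 1).filter
        (fun c => present.contains c != present.contains (c - 1))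
        = x :: pvTailRuns x D := by
      rw [PySem.List.pyRange_one_cons (by omega), List.filter_cons]
      have htail := pvFilter_eq_tailRuns present D x hxmem
        (fun c hc => by
          rw [hmemM c]
          constructor
          · intro h
            rcases List.mem_cons.mp h with h' | h'
            · omega
            · exact h'
          · exact fun h => List.mem_cons_of_mem _ h)
        hMsort
      rw [← hlastdef] at htail
      rw [htail]
      simp [List.contains_eq_mem, hxmem, hxm1']
    rw [hfilter]
    -- A's side: the outer loop computes the run grouping of the deduped codes
    have hA := pvAInner_eq_runs rest x x hpair
    rw [pvRuns_eq_cons] at hA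
    simp only [pvAOuter, ← hxdef, ← hDdef] at hA ⊢
    rw [hA]
    simp
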